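-- pv_equiv track=rewrite | github.com/srunvirakyuth/homework_8_collab | exercise-5.py | reverse_ascending
-- ===== SOURCE A (Python) =====
-- def reverse_ascending(items):
--     # return nothing if the list is empty
--     if not items:
--         return []
--
--     # create a list to store the reversed subsequence
--     current_subseq = [items[0]]
--
--     # iterate through the list and check if the current item is greater than the previous item
--     for i in range(1, len(items)):
--         if items[i] > items[i - 1]:
--
--             # append the current item to the current subsequence
--             current_subseq.append(items[i])
--
--         # if the current item is less than the previous item, yield the reversed subsequence
--         else:
--             yield from reversed(current_subseq)
--             current_subseq = [items[i]]
--
--     # yield the reversed subsequence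
--     yield from reversed(current_subseq)
-- ===== SOURCE B (Python) =====
-- def reverse_ascending(items):
--     n = len(items)
--     # first pass: all boundaries where the ascent breaks
--     breaks = [i for i in range(1, n) if items[i] <= items[i - 1]]
--     bounds = [0] + breaks + [n]
--     # second pass: emit each segment reversed
--     for s, e in zip(bounds, bounds[1:]):
--         yield from reversed(items[s:e])
-- ===== Notes on version B (the rewrite author's own statement) =====
-- stated objective: alternative
-- what changed: B first computes the complete list of run boundaries (indices where the ascent breaks) in one pass, then in a separate pass slices out each segment and yields it reversed, instead of A's single pass that maintains a running buffer and flushes it at each break.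
import Mathlib
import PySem

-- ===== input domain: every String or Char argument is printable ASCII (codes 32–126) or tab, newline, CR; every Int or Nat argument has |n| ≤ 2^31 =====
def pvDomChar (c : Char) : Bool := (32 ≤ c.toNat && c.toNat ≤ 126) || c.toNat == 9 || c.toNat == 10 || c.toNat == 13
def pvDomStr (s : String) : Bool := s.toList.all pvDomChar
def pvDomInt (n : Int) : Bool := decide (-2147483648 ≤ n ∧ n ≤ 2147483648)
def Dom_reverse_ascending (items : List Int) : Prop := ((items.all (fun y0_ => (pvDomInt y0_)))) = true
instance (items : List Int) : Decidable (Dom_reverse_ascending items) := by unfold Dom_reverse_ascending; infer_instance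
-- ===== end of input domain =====

-- B computes all run boundaries first and then slices; same O(n) cost, different decomposition (alternative).

-- ===== PORT A =====
-- single pass: running buffer current_subseq, flushed reversed at each break
def reverse_ascending (items : List Int) : List Int :=
  match items with
  | [] => []
  | x :: _ =>
    let r := (PySem.List.pyRange 1 (PySem.List.len items) 1).foldl
      (fun (st : List Int × List Int) i =>
        if PySem.List.pyGetD items (i - 1) 0 < PySem.List.pyGetD items i 0 then
          (st.1, st.2 ++ [PySem.List.pyGetD items i 0])
        else
          (st.1 ++ st.2.reverse, [PySem.List.pyGetD items i 0]))
      ([], [x])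
    r.1 ++ r.2.reverse

-- ===== PORT B =====
-- two passes: collect all break indices, then emit each slice reversed
def reverse_ascending_alt (items : List Int) : List Int :=
  let n := PySem.List.len items
  let breaks := (PySem.List.pyRange 1 n 1).filter
    (fun i => PySem.List.pyGetD items i 0 ≤ PySem.List.pyGetD items (i - 1) 0)
  let bounds := [0] ++ breaks ++ [n]
  (bounds.zip bounds.tail).foldl
    (fun out (p : Int × Int) =>
      out ++ (PySem.List.slice items (some p.1) (some p.2)).reverse) []

-- ===== PRECONDITION & SPEC =====
def Spec_reverse_ascending (items : List Int) (out : List Int) : Prop := out = reverse_ascending_alt items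
instance (items : List Int) (out : List Int) : Decidable (Spec_reverse_ascending items out) := by unfold Spec_reverse_ascending; infer_instance

-- ===== CLAIM (what is proved, stated in full; the proofs are below) =====
def Claim_equal_reverse_ascending : Prop := ∀ (items : List Int), Dom_reverse_ascending items → Spec_reverse_ascending items (reverse_ascending items)

-- ===== LEMMAS AND PROOFS =====

-- A's loop as structural recursion on the index
def loopA (xs : List Int) (out cur : List Int) (j : Nat) : List Int :=
  if h : j < xs.length then
    if xs.getD (j - 1) 0 < xs.getD j 0 then loopA xs out (cur ++ [xs.getD j 0]) (j + 1)
    else loopA xs (out ++ cur.reverse) [xs.getD j 0] (j + 1)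
  else out ++ cur.reverse
termination_by xs.length - j

-- consecutive pairs of (s :: l)
def segs (s : Int) : List Int → List (Int × Int)
  | [] => []
  | e :: rest => (s, e) :: segs e rest

-- break indices from j upward
def breaksFrom (xs : List Int) (j : Nat) : List Int :=
  (PySem.List.pyRange (j : Int) (PySem.List.len xs) 1).filter
    (fun i => PySem.List.pyGetD xs i 0 ≤ PySem.List.pyGetD xs (i - 1) 0)

def gSeg (xs : List Int) (p : Int × Int) : List Int :=
  (PySem.List.slice xs (some p.1) (some p.2)).reverse

lemma zip_tail_eq_segs (s : Int) (l : List Int) :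
    (s :: l).zip l = segs s l := by
  induction l generalizing s with
  | nil => rfl
  | cons e rest ih => simp [segs, List.zip_cons_cons, ih e]

lemma foldA_eq_loopA (xs : List Int) :
    ∀ (j : Nat) (out cur : List Int), 1 ≤ j →
      (((PySem.List.pyRange (j : Int) (PySem.List.len xs) 1).foldl
        (fun (st : List Int × List Int) i =>
          if PySem.List.pyGetD xs (i - 1) 0 < PySem.List.pyGetD xs i 0 then
            (st.1, st.2 ++ [PySem.List.pyGetD xs i 0])
          else
            (st.1 ++ st.2.reverse, [PySem.List.pyGetD xs i 0]))
        (out, cur)).1 ++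
       ((PySem.List.pyRange (j : Int) (PySem.List.len xs) 1).foldl
        (fun (st : List Int × List Int) i =>
          if PySem.List.pyGetD xs (i - 1) 0 < PySem.List.pyGetD xs i 0 then
            (st.1, st.2 ++ [PySem.List.pyGetD xs i 0])
          else
            (st.1 ++ st.2.reverse, [PySem.List.pyGetD xs i 0]))
        (out, cur)).2.reverse) = loopA xs out cur j := by
  intro j
  induction hn : xs.length - j using Nat.strong_induction_on generalizing j with
  | _ m ih =>
    intro out cur hj
    by_cases h : j < xs.length
    · have hlt : (j : Int) < PySem.List.len xs := by
        simp [PySem.List.len_eq]; exact_mod_cast h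
      rw [PySem.List.pyRange_one_cons hlt]
      have hcast : (j : Int) - 1 = ((j - 1 : Nat) : Int) := by omega
      simp only [List.foldl_cons, hcast, PySem.List.pyGetD_natCast]
      have hstep : ((j : Int) + 1) = ((j + 1 : Nat) : Int) := by push_cast; ring
      rw [loopA]
      simp only [h, dif_pos]
      by_cases hc : xs.getD (j - 1) 0 < xs.getD j 0
      · simp only [hc, if_pos]
        rw [hstep, ih (xs.length - (j + 1)) (by omega) (j + 1) rfl out (cur ++ [xs.getD j 0]) (by omega)]
      · simp only [hc, if_neg, not_false_iff]
        rw [hstep, ih (xs.length - (j + 1)) (by omega) (j + 1) rfl (out ++ cur.reverse) [xs.getD j 0] (by omega)]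
    · have : PySem.List.len xs ≤ (j : Int) := by
        simp [PySem.List.len_eq]; exact_mod_cast Nat.le_of_not_lt h
      rw [PySem.List.pyRange_one_eq_nil this, loopA]
      simp [h]

lemma breaksFrom_ge (xs : List Int) (j : Nat) (h : xs.length ≤ j) :
    breaksFrom xs j = [] := by
  unfold breaksFrom
  rw [PySem.List.pyRange_one_eq_nil (by simp [PySem.List.len_eq]; exact_mod_cast h)]
  rfl

lemma breaksFrom_lt (xs : List Int) (j : Nat) (hj : 1 ≤ j) (h : j < xs.length) :
    breaksFrom xs j =
      (if xs.getD j 0 ≤ xs.getD (j - 1) 0 then [(j : Int)] else []) ++ breaksFrom xs (j + 1) := by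
  unfold breaksFrom
  rw [PySem.List.pyRange_one_cons (by simp [PySem.List.len_eq]; exact_mod_cast h)]
  have hcast : (j : Int) - 1 = ((j - 1 : Nat) : Int) := by omega
  have hstep : ((j : Int) + 1) = ((j + 1 : Nat) : Int) := by push_cast; ring
  rw [List.filter_cons, hstep]
  simp only [hcast, PySem.List.pyGetD_natCast]
  split <;> simp_all

-- MAIN invariant: A's loop from j with buffer = slice [s, j) produces the boundary decomposition
lemma loopA_eq_segs (xs : List Int) :
    ∀ (j s : Nat) (out : List Int), s < j →
      loopA xs out ((xs.drop s).take (j - s)) j =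
        out ++ (segs (s : Int) (breaksFrom xs j ++ [PySem.List.len xs])).flatMap (gSeg xs) := by
  intro j
  induction hn : xs.length - j using Nat.strong_induction_on generalizing j with
  | _ m ih =>
    intro s out hsj
    rw [loopA]
    by_cases h : j < xs.length
    · simp only [h, dif_pos]
      have hget : xs.getD j 0 = (xs.drop s).getD (j - s) 0 := by
        have hsum : s + (j - s) = j := by omega
        simp [List.getD, List.getElem?_drop, hsum]
      by_cases hc : xs.getD (j - 1) 0 < xs.getD j 0
      · simp only [hc, if_pos]
        have htake : (xs.drop s).take (j - s) ++ [xs.getD j 0] = (xs.drop s).take (j + 1 - s) := by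
          have h1 : j + 1 - s = (j - s) + 1 := by omega
          rw [h1, List.take_add_one, hget]
          have : (j - s) < (xs.drop s).length := by simp [List.length_drop]; omega
          simp [List.getD, List.getElem?_eq_getElem this]
        rw [htake, ih (xs.length - (j + 1)) (by omega) (j + 1) rfl s out (by omega)]
        rw [breaksFrom_lt xs j (by omega) h]
        simp only [if_neg (not_le.mpr hc), List.nil_append]
      · simp only [hc, if_neg, not_false_iff]
        have hone : [xs.getD j 0] = (xs.drop j).take (j + 1 - j) := by
          have : j + 1 - j = 1 := by omega
          rw [this]
          rcases hd : xs.drop j with _ | ⟨y, t⟩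
          · exfalso; have := congrArg List.length hd; simp [List.length_drop] at this; omega
          · have h0 : (xs.drop j)[0]? = some y := by rw [hd]; rfl
            rw [List.getElem?_drop] at h0
            simp only [Nat.add_zero] at h0
            simp [List.getD, h0]
        rw [hone, ih (xs.length - (j + 1)) (by omega) (j + 1) rfl j (out ++ ((xs.drop s).take (j - s)).reverse) (by omega)]
        rw [breaksFrom_lt xs j (by omega) h]
        rw [if_pos (not_lt.mp hc)]
        simp only [List.cons_append, segs, List.flatMap_cons,
          List.append_assoc]
        congr 1
        congr 1
        unfold gSeg
        rw [PySem.List.slice_natCast]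
    · simp only [h, dif_neg, not_false_iff]
      rw [breaksFrom_ge xs j (Nat.le_of_not_lt h)]
      simp only [List.nil_append, segs, List.flatMap_cons, List.flatMap_nil, List.append_nil]
      congr 1
      unfold gSeg
      have hlen : PySem.List.len xs = ((xs.length : Nat) : Int) := by simp [PySem.List.len_eq]
      rw [hlen, PySem.List.slice_natCast]
      congr 1
      rw [List.take_of_length_le (show (xs.drop s).length ≤ j - s by simp; omega),
          List.take_of_length_le (show (xs.drop s).length ≤ xs.length - s by simp)]

lemma alt_eq_flat (xs : List Int) :
    reverse_ascending_alt xs =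
      (segs 0 (breaksFrom xs 1 ++ [PySem.List.len xs])).flatMap (gSeg xs) := by
  unfold reverse_ascending_alt breaksFrom
  rw [PySem.List.foldl_append_eq_flatMap
    (g := fun p : Int × Int => (PySem.List.slice xs (some p.1) (some p.2)).reverse)]
  rw [show ∀ (a b : List Int), [0] ++ a ++ b = 0 :: (a ++ b) from fun _ _ => rfl]
  rw [List.tail_cons, zip_tail_eq_segs]
  norm_num
  rfl

-- ===== VERDICT (by name: the statement is the Claim_ definition above) =====
theorem reverse_ascending_spec : Claim_equal_reverse_ascending := by
  unfold Claim_equal_reverse_ascending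
  intro items _
  unfold Spec_reverse_ascending
  rw [alt_eq_flat]
  match items with
  | [] => decide
  | x :: rest =>
    have hf := foldA_eq_loopA (x :: rest) 1 [] [x] (by omega)
    simp only [Nat.cast_one] at hf
    unfold reverse_ascending
    simp only []
    rw [hf]
    rw [show [x] = ((x :: rest).drop 0).take (1 - 0) by simp]
    rw [loopA_eq_segs (x :: rest) 1 0 [] (by omega)]
    simp
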